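-- pv_equiv track=rewrite | github.com/fulajtarova/UI | main.py | is_valid_board
-- ===== SOURCE A (Python) =====
-- def is_valid_board(board, n):
--     if not all(isinstance(x, int) for x in board):
--         return False
--
--     if len(board) != n * n:
--         return False
--
--     if len(set(board)) != len(board):
--         return False
--
--     if not all(0 <= x < n * n for x in board):
--         return False
--
--     return True
-- ===== SOURCE B (Python) =====
-- def is_valid_board(board, n):
--     if not all(isinstance(x, int) for x in board):
--         return False
--     return len(board) == n * n and sorted(board) == list(range(len(board)))
-- ===== Notes on version B (the rewrite author's own statement) =====
-- stated objective: simpler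
-- what changed: replaces the three separate scans (length, uniqueness via set, 0..n*n-1 range check) with a single sort-and-compare against list(range(len(board)))
import Mathlib
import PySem

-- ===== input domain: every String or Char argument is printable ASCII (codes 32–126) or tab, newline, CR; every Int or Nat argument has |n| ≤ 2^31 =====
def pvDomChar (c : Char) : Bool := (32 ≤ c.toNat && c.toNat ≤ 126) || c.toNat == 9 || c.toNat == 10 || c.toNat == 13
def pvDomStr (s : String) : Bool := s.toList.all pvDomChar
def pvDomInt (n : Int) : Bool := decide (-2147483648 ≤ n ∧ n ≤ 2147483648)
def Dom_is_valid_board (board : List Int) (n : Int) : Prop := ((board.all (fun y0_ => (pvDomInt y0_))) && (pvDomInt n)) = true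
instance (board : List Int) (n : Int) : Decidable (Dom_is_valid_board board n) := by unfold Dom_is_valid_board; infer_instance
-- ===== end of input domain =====

-- B replaces A's three separate scans (length, uniqueness via set, range check) with a
-- single sort-and-compare against the canonical list 0..n*n-1; objective: simpler.

-- ===== PORT A =====
def is_valid_board (board : List Int) (n : Int) : Bool :=
  -- `isinstance(x, int)` is identically true on List Int
  if !(board.all (fun _x => true)) then false
  else if PySem.List.len board ≠ n * n then false
  else if PySem.Set.len (PySem.Set.ofList board) ≠ PySem.List.len board then false
  else if !(board.all (fun x => decide (0 ≤ x) && decide (x < n * n))) then false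
  else true

-- ===== PORT B =====
def is_valid_board_alt (board : List Int) (n : Int) : Bool :=
  if !(board.all (fun _x => true)) then false
  else (PySem.List.len board == n * n)
    && (PySem.List.sorted board (fun x => x) false == PySem.List.pyRange 0 (PySem.List.len board) 1)

-- ===== PRECONDITION & SPEC =====
def Spec_is_valid_board (board : List Int) (n : Int) (out : Bool) : Prop := out = is_valid_board_alt board n
instance (board : List Int) (n : Int) (out : Bool) : Decidable (Spec_is_valid_board board n out) := by unfold Spec_is_valid_board; infer_instance

-- ===== CLAIM (what is proved, stated in full; the proofs are below) =====
def Claim_equal_is_valid_board : Prop := ∀ (board : List Int) (n : Int), Dom_is_valid_board board n → Spec_is_valid_board board n (is_valid_board board n)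

-- ===== LEMMAS AND PROOFS =====

-- len(set(xs)) == len(xs) characterises Nodup
theorem pv_ofList_len_iff_nodup (xs : List Int) :
    (PySem.Set.ofList xs).length = xs.length ↔ xs.Nodup := by
  constructor
  · induction xs using List.reverseRecOn with
    | nil => intro _; exact List.nodup_nil
    | append_singleton ys x ih =>
      intro h
      rw [PySem.Set.ofList_append_singleton, PySem.Set.add_eq_ite] at h
      by_cases hx : x ∈ PySem.Set.ofList ys
      · rw [if_pos hx] at h
        have hle := PySem.Set.length_ofList_le (xs := ys)
        simp [List.length_append] at h
        omega
      · rw [if_neg hx] at h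
        simp [List.length_append] at h
        have hnd := ih h
        have hxy : x ∉ ys := by
          simpa [PySem.Set.mem_ofList] using hx
        exact (List.perm_append_comm (l₁ := [x]) (l₂ := ys)).nodup
          (List.nodup_cons.mpr ⟨hxy, hnd⟩)
  · intro h
    rw [PySem.Set.ofList_eq_self_of_nodup _ h]

-- a Nodup list of length L with values in [0, L) is a permutation of range(L)
theorem pv_perm_range (xs : List Int)
    (hnd : xs.Nodup) (hmem : ∀ x ∈ xs, 0 ≤ x ∧ x < (xs.length : Int)) :
    (PySem.List.pyRange 0 (xs.length : Int) 1).Perm xs := by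
  have hsub : xs ⊆ PySem.List.pyRange 0 (xs.length : Int) 1 := by
    intro x hx
    rw [PySem.List.mem_pyRange_one]
    exact (hmem x hx)
  have hsp : List.Subperm xs (PySem.List.pyRange 0 (xs.length : Int) 1) := hnd.subperm hsub
  have hlen : (PySem.List.pyRange 0 (xs.length : Int) 1).length ≤ xs.length := by
    rw [PySem.List.length_pyRange_one]
    omega
  exact (hsp.perm_of_length_le hlen).symm

-- sorted(xs) == list(range(len(xs))) characterises "Nodup and in range"
theorem pv_sorted_eq_range_iff (xs : List Int) :
    PySem.List.sorted xs (fun x => x) false = PySem.List.pyRange 0 (xs.length : Int) 1 ↔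
      xs.Nodup ∧ ∀ x ∈ xs, 0 ≤ x ∧ x < (xs.length : Int) := by
  constructor
  · intro h
    have hperm : (PySem.List.pyRange 0 (xs.length : Int) 1).Perm xs := by
      rw [← h]
      exact PySem.List.sorted_perm xs (fun x => x) false
    constructor
    · exact hperm.nodup (PySem.List.nodup_pyRange_one 0 (xs.length : Int))
    · intro x hx
      have : x ∈ PySem.List.pyRange 0 (xs.length : Int) 1 := hperm.mem_iff.mpr hx
      exact PySem.List.mem_pyRange_one.mp this
  · intro h
    obtain ⟨hnd, hmem⟩ := h
    apply PySem.List.sorted_eq_of_perm_of_pairwise_lt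
    · exact pv_perm_range xs hnd hmem
    · exact PySem.List.pairwise_lt_pyRange_one 0 (xs.length : Int)

-- ===== VERDICT (by name: the statement is the Claim_ definition above) =====
theorem is_valid_board_spec : Claim_equal_is_valid_board := by
  intro board n _
  unfold Spec_is_valid_board is_valid_board is_valid_board_alt
  have htriv : board.all (fun _x => true) = true := by simp
  simp only [htriv, Bool.not_true, Bool.false_eq_true, if_false, PySem.List.len_eq]
  by_cases hlen : (board.length : Int) = n * n
  · rw [← hlen]
    rw [Bool.eq_iff_iff]
    simp [PySem.Set.len]
    rw [pv_sorted_eq_range_iff]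
    have hiff := pv_ofList_len_iff_nodup board
    constructor
    · intro h
      exact ⟨hiff.mp h.1, h.2⟩
    · intro h
      exact ⟨hiff.mpr h.1, h.2⟩
  · have hne : ¬ ((board.length : Int) = n * n) := hlen
    simp [hne]
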